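-- pv_equiv track=rewrite | github.com/dcclyde/coding_puzzles | google_codejam/2018_2/A.py | solve
-- ===== SOURCE A (Python) =====
-- import copy
--
-- def solve(dat):
--     N = len(dat)
--     if dat[0] == 0 or dat[-1] == 0:
--         return 'IMPOSSIBLE'
--
--     assert sum(dat) == N
--
--     dests = []
--     for k, q in enumerate(dat):
--         dests += [k for x in range(q)]
--
--     assert len(dests) == N
--     assert dests[0] == 0
--     assert dests[N-1] == N-1
--
--     out = []
--     curr = [k for k in range(N)]
--     future = copy.deepcopy(curr)
--     while curr != dests:
--         row = ['.' for x in range(N)]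
--         for k in range(N):
--             if curr[k] == dests[k]:
--                 future[k] = curr[k]
--             elif curr[k] < dests[k]:
--                 row[curr[k]] = '\\'
--                 future[k] = curr[k] + 1
--             elif curr[k] > dests[k]:
--                 row[curr[k]] = '/'
--                 future[k] = curr[k] - 1
--             else:
--                 assert False, ':('
--         out.append(''.join(row))
--         curr, future = future, curr
--     out.append('.' * N)
--
--     out = [str(len(out))] + out
--     return '\n'.join(out)
-- ===== SOURCE B (Python) =====
-- def solve(dat):
--     N = len(dat)
--     if dat[0] == 0 or dat[-1] == 0:
--         return 'IMPOSSIBLE'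
--
--     assert sum(dat) == N
--
--     dests = []
--     for k, q in enumerate(dat):
--         dests += [k for x in range(q)]
--
--     assert len(dests) == N
--     assert dests[0] == 0
--     assert dests[N-1] == N-1
--
--     # Closed form: element k needs abs(dests[k]-k) moves; row count R is the max.
--     R = max(abs(dests[k] - k) for k in range(N))
--     grid = [['.' for x in range(N)] for t in range(R)]
--     # Route each element's whole trajectory at once (ascending k: later k wins on shared cells).
--     for k in range(N):
--         d = dests[k]
--         if d > k:
--             for t in range(d - k):
--                 grid[t][k + t] = '\\'
--         elif d < k:
--             for t in range(k - d):
--                 grid[t][k - t] = '/'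
--
--     lines = [str(R + 1)]
--     for row in grid:
--         lines.append(''.join(row))
--     lines.append('.' * N)
--     return '\n'.join(lines)
-- ===== Notes on version B (the rewrite author's own statement) =====
-- stated objective: alternative
-- what changed: Replaces the step-by-step curr/future simulation (while curr != dests, advancing every element one cell per emitted row) by a closed-form construction: the row count R = max(abs(dests[k]-k)) is computed directly and each element's whole diagonal trajectory is written into a preallocated grid in one pass per element (ascending k, so overwrites on shared cells match A).
import Mathlib
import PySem

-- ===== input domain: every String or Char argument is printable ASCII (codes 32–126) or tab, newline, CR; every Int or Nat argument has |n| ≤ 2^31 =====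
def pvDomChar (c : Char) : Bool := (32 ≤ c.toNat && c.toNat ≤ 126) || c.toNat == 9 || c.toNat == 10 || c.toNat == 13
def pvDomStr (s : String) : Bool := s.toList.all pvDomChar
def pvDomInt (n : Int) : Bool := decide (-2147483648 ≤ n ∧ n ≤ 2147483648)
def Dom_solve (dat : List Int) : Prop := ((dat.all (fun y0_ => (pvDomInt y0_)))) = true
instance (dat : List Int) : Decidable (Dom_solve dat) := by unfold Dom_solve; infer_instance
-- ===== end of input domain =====

-- B replaces A's row-by-row curr/future simulation by a closed-form grid: R = max |dests[k]-k|
-- rows, each element's whole diagonal written in one pass (alternative decomposition, same cost).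

-- ===== PORT A =====
-- shared helper: the 'dests' expansion, identical code in both Pythons
-- dests = []; for k, q in enumerate(dat): dests += [k for x in range(q)]
def pvDests (dat : List Int) : List Int :=
  (PySem.List.enumerate dat 0).foldl
    (fun acc kq => acc ++ (PySem.List.pyRange 0 kq.2 1).map (fun _ => kq.1)) []

-- one iteration of A's inner 'for k in range(N)': builds (row, future); reads only curr/dests
def pvLoopBody (dests curr : List Int) (N : Int) (fut : List Int) : List Char × List Int :=
  (PySem.List.pyRange 0 N 1).foldl
    (fun st k =>
      let c := PySem.List.pyGetD curr k 0
      let d := PySem.List.pyGetD dests k 0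
      if c = d then (st.1, PySem.List.pySetD st.2 k c)
      else if c < d then (PySem.List.pySetD st.1 c '\\', PySem.List.pySetD st.2 k (c + 1))
      else (PySem.List.pySetD st.1 c '/', PySem.List.pySetD st.2 k (c - 1)))
    ((PySem.List.pyRange 0 N 1).map (fun _ => '.'), fut)

-- A's 'while curr != dests' loop; the Nat argument is a fuel bound only (the loop runs
-- at most N times, fuel N+1 is never exhausted inside Pre_)
def pvLoopA (N : Int) (dests : List Int) : Nat → List Int → List Int → List String → List String
  | 0, _, _, out => out
  | (f + 1), curr, fut, out =>
    if curr = dests then out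
    else
      let rf := pvLoopBody dests curr N fut
      pvLoopA N dests f rf.2 curr (out ++ [String.ofList rf.1])

def solve (dat : List Int) : String :=
  let N := PySem.List.len dat
  -- 'if dat[0] == 0 or dat[-1] == 0' (IndexError on [] is outside Pre_)
  if PySem.List.pyGetD dat 0 0 = 0 ∨ PySem.List.pyGetD dat (-1) 0 = 0 then "IMPOSSIBLE"
  -- each 'assert' is ported as a guard; Python raises on the else branch (outside Pre_)
  else if ¬ (dat.sum = N) then ""
  else
    let dests := pvDests dat
    if ¬ (PySem.List.len dests = N) then ""
    else if ¬ (PySem.List.pyGetD dests 0 0 = 0) then ""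
    else if ¬ (PySem.List.pyGetD dests (N - 1) 0 = N - 1) then ""
    else
      let out := pvLoopA N dests (dat.length + 1) (PySem.List.pyRange 0 N 1)
                   (PySem.List.pyRange 0 N 1) []
      let out2 := out ++ [String.ofList (PySem.List.pyRepeat ['.'] N)]
      PySem.Str.join "\n" (PySem.Int.toStr (PySem.List.len out2) :: out2)

-- ===== PORT B =====
-- body of B's 'for k in range(N)': write element k's whole trajectory into the grid
def pvBStep (dests : List Int) (g : List (List Char)) (k : Int) : List (List Char) :=
  let d := PySem.List.pyGetD dests k 0
  if d > k then
    (PySem.List.pyRange 0 (d - k) 1).foldl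
      (fun g2 t =>
        PySem.List.pySetD g2 t
          (PySem.List.pySetD (PySem.List.pyGetD g2 t []) (k + t) '\\')) g
  else if d < k then
    (PySem.List.pyRange 0 (k - d) 1).foldl
      (fun g2 t =>
        PySem.List.pySetD g2 t
          (PySem.List.pySetD (PySem.List.pyGetD g2 t []) (k - t) '/')) g
  else g

def solve_alt (dat : List Int) : String :=
  let N := PySem.List.len dat
  if PySem.List.pyGetD dat 0 0 = 0 ∨ PySem.List.pyGetD dat (-1) 0 = 0 then "IMPOSSIBLE"
  else if ¬ (dat.sum = N) then ""
  else
    let dests := pvDests dat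
    if ¬ (PySem.List.len dests = N) then ""
    else if ¬ (PySem.List.pyGetD dests 0 0 = 0) then ""
    else if ¬ (PySem.List.pyGetD dests (N - 1) 0 = N - 1) then ""
    else
      -- R = max(abs(dests[k] - k) for k in range(N))
      let R := (PySem.List.max?
                  ((PySem.List.pyRange 0 N 1).map (fun k => |PySem.List.pyGetD dests k 0 - k|))
                  (fun x => x)).getD 0
      -- grid = [['.' for x in range(N)] for t in range(R)]
      let grid0 : List (List Char) :=
        (PySem.List.pyRange 0 R 1).map (fun _ => (PySem.List.pyRange 0 N 1).map (fun _ => '.'))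
      let grid := (PySem.List.pyRange 0 N 1).foldl (pvBStep dests) grid0
      let lines := grid.foldl (fun acc row => acc ++ [String.ofList row])
                     [PySem.Int.toStr (R + 1)]
      PySem.Str.join "\n" (lines ++ [String.ofList (PySem.List.pyRepeat ['.'] N)])

-- ===== PRECONDITION & SPEC =====
-- Pre_ excludes exactly the inputs where Python A raises: the empty list (IndexError on dat[0]),
-- and non-'IMPOSSIBLE' inputs whose counts are negative or do not sum to len(dat) (AssertionError).
def Pre_solve (dat : List Int) : Prop :=
  dat ≠ [] ∧ (PySem.List.pyGetD dat 0 0 = 0 ∨ PySem.List.pyGetD dat (-1) 0 = 0 ∨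
    (dat.sum = dat.length ∧ ∀ q ∈ dat, 0 ≤ q))
instance (dat : List Int) : Decidable (Pre_solve dat) := by unfold Pre_solve; infer_instance

def pvWitness_solve : List Int := [2, 0, 1]

def Spec_solve (dat : List Int) (out : String) : Prop := out = solve_alt dat
instance (dat : List Int) (out : String) : Decidable (Spec_solve dat out) := by
  unfold Spec_solve; infer_instance

-- ===== CLAIM (what is proved, stated in full; the proofs are below) =====
def Claim_equal_solve : Prop :=
  ∀ (dat : List Int), Dom_solve dat → Pre_solve dat → Spec_solve dat (solve dat)

-- ===== LEMMAS AND PROOFS =====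

-- destination of element k (as both programs read it)
def pvD (dests : List Int) (k : Int) : Int := PySem.List.pyGetD dests k 0

-- position of element k after t unit moves towards d (clamped at d)
def pvApproach (d k : Int) (t : Nat) : Int :=
  if k < d then min (k + t) d else max (k - t) d

-- A's curr after t iterations
def pvCurrAt (dests : List Int) (N : Nat) (t : Nat) : List Int :=
  (PySem.List.pyRange 0 (N : Int) 1).map (fun k => pvApproach (pvD dests k) k t)

def pvDotsI (N : Int) : List Char := (PySem.List.pyRange 0 N 1).map (fun _ => '.')

-- canonical effect of element k on row t
def pvWriteK (t : Nat) (d k : Int) (row : List Char) : List Char :=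
  if (t : Int) < |d - k| then
    PySem.List.pySetD row (pvApproach d k t) (if k < d then '\\' else '/')
  else row

-- canonical row t
def pvRowAt (dests : List Int) (N t : Nat) : List Char :=
  (PySem.List.pyRange 0 (N : Int) 1).foldl
    (fun row k => pvWriteK t (pvD dests k) k row) (pvDotsI (N : Int))

-- A-side step functions (the two independent components of pvLoopBody's fold)
def pvRowStep (dests curr : List Int) (row : List Char) (k : Int) : List Char :=
  let c := PySem.List.pyGetD curr k 0
  let d := PySem.List.pyGetD dests k 0
  if c = d then row
  else if c < d then PySem.List.pySetD row c '\\'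
  else PySem.List.pySetD row c '/'

def pvFutStep (dests curr : List Int) (f : List Int) (k : Int) : List Int :=
  let c := PySem.List.pyGetD curr k 0
  let d := PySem.List.pyGetD dests k 0
  PySem.List.pySetD f k (if c = d then c else if c < d then c + 1 else c - 1)

theorem pvLoopBody_eq (dests curr : List Int) (N : Int) (fut : List Int) :
    pvLoopBody dests curr N fut =
      ((PySem.List.pyRange 0 N 1).foldl (pvRowStep dests curr) (pvDotsI N),
       (PySem.List.pyRange 0 N 1).foldl (pvFutStep dests curr) fut) := by
  unfold pvLoopBody pvDotsI
  rw [PySem.List.foldl_congr_mem _ _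
        (fun st k => (pvRowStep dests curr st.1 k, pvFutStep dests curr st.2 k)) _ ?_]
  · rw [PySem.List.foldl_prod_mk]
  · intro acc x _
    unfold pvRowStep pvFutStep
    dsimp only
    split_ifs <;> rfl

-- writing positions 0..m-1 of a list (all of it, when m = length)
theorem pvSetAll {α : Type} (v : Int → α) (m : Nat) (fut : List α) (h : m ≤ fut.length) :
    (PySem.List.pyRange 0 (m : Int) 1).foldl (fun f k => PySem.List.pySetD f k (v k)) fut
      = (PySem.List.pyRange 0 (m : Int) 1).map v ++ fut.drop m := by
  induction m with
  | zero => simp [PySem.List.pyRange_one_eq_nil]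
  | succ m ih =>
    have hm : m ≤ fut.length := by omega
    rw [show ((m + 1 : Nat) : Int) = (m : Int) + 1 by push_cast; ring,
        PySem.List.pyRange_one_succ_right (by positivity), List.foldl_append,
        List.map_append, ih hm]
    simp only [List.foldl_cons, List.foldl_nil, List.map_cons, List.map_nil]
    rw [show ((m : Int)) = ((m : Nat) : Int) from rfl, PySem.List.pySetD_natCast]
    have hlm : ((PySem.List.pyRange 0 (m : Int) 1).map v).length = m := by
      simp [PySem.List.length_pyRange_one]
    rw [List.set_append_right _ _ (by omega), List.append_assoc]
    congr 1
    rw [List.drop_eq_getElem_cons (by omega : m < fut.length)]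
    simp only [hlm, Nat.sub_self, List.set_cons_zero, List.singleton_append]

theorem pvApproach_zero (d k : Int) : pvApproach d k 0 = k := by
  unfold pvApproach; split <;> omega

theorem pvCurrAt_zero (dests : List Int) (N : Nat) :
    pvCurrAt dests N 0 = PySem.List.pyRange 0 (N : Int) 1 := by
  unfold pvCurrAt
  simp [pvApproach_zero]

theorem pvApproach_next (d k : Int) (t : Nat) :
    (if pvApproach d k t = d then pvApproach d k t
     else if pvApproach d k t < d then pvApproach d k t + 1 else pvApproach d k t - 1)
      = pvApproach d k (t + 1) := by
  unfold pvApproach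
  split_ifs <;> omega

theorem pvApproach_eq_iff (d k : Int) (t : Nat) :
    pvApproach d k t = d ↔ |d - k| ≤ (t : Int) := by
  unfold pvApproach
  rcases le_total k d with h | h
  · rw [abs_of_nonneg (by omega)]; split_ifs <;> omega
  · rw [abs_of_nonpos (by omega)]; split_ifs <;> omega

theorem pvStep_eq_writeK (d k : Int) (t : Nat) (row : List Char) :
    (if pvApproach d k t = d then row
     else if pvApproach d k t < d then PySem.List.pySetD row (pvApproach d k t) '\\'
     else PySem.List.pySetD row (pvApproach d k t) '/')
      = pvWriteK t d k row := by
  unfold pvWriteK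
  rcases lt_trichotomy k d with hkd | hkd | hkd
  · have habs : |d - k| = d - k := abs_of_pos (by omega)
    have ha : pvApproach d k t = min (k + (t : Int)) d := by unfold pvApproach; rw [if_pos hkd]
    by_cases hts : (t : Int) < |d - k|
    · have hmin : pvApproach d k t = k + (t : Int) := by rw [ha]; omega
      rw [if_pos hts, hmin, if_neg (by omega), if_pos (by omega), if_pos hkd]
    · have hmin : pvApproach d k t = d := by rw [ha]; omega
      rw [if_neg hts, if_pos hmin]
  · subst hkd
    rw [if_pos (by unfold pvApproach; omega), if_neg (by simp)]
  · have ha : pvApproach d k t = max (k - (t : Int)) d := by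
      unfold pvApproach; rw [if_neg (by omega)]
    by_cases hts : (t : Int) < |d - k|
    · rw [if_pos hts]
      have habs : |d - k| = k - d := by rw [abs_of_neg (show d - k < 0 by omega)]; ring
      rw [habs] at hts
      have hmax : pvApproach d k t = k - (t : Int) := by rw [ha]; omega
      rw [hmax, if_neg (by omega), if_neg (by omega), if_neg (by omega)]
    · have hmax : pvApproach d k t = d := by
        rw [show |d - k| = k - d by rw [abs_of_neg (show d - k < 0 by omega)]; ring] at hts
        rw [ha]; omega
      rw [if_neg hts, if_pos hmax]

theorem pvFutFold (dests : List Int) (N : Nat) (t : Nat) (fut : List Int)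
    (h : fut.length = N) :
    (PySem.List.pyRange 0 (N : Int) 1).foldl (pvFutStep dests (pvCurrAt dests N t)) fut
      = pvCurrAt dests N (t + 1) := by
  unfold pvFutStep
  rw [PySem.List.foldl_congr_mem _ _
        (fun f k => PySem.List.pySetD f k (pvApproach (pvD dests k) k (t + 1))) _ ?_]
  · rw [pvSetAll _ N fut (by omega)]
    simp [pvCurrAt, h]
  · intro acc k hk
    rw [PySem.List.mem_pyRange_one] at hk
    dsimp only
    unfold pvCurrAt at *
    rw [PySem.List.pyGetD_map_pyRange_of_nonneg _ _ _ _ hk.1 hk.2]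
    rw [← pvApproach_next (pvD dests k) k t]
    rfl

theorem pvRowFold (dests : List Int) (N : Nat) (t : Nat) :
    (PySem.List.pyRange 0 (N : Int) 1).foldl (pvRowStep dests (pvCurrAt dests N t)) (pvDotsI (N : Int))
      = pvRowAt dests N t := by
  unfold pvRowAt
  apply PySem.List.foldl_congr_mem
  intro row k hk
  rw [PySem.List.mem_pyRange_one] at hk
  unfold pvRowStep
  dsimp only
  rw [show PySem.List.pyGetD (pvCurrAt dests N t) k 0 = pvApproach (pvD dests k) k t by
        unfold pvCurrAt; exact PySem.List.pyGetD_map_pyRange_of_nonneg _ _ _ _ hk.1 hk.2,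
      show PySem.List.pyGetD dests k 0 = pvD dests k from rfl]
  exact pvStep_eq_writeK (pvD dests k) k t row

theorem pvStopIff (dests : List Int) (N : Nat) (hlen : dests.length = N) (t : Nat) :
    pvCurrAt dests N t = dests ↔
      ∀ k ∈ PySem.List.pyRange 0 (N : Int) 1, |pvD dests k - k| ≤ (t : Int) := by
  have hclen : (pvCurrAt dests N t).length = N := by
    unfold pvCurrAt; simp [PySem.List.length_pyRange_one]
  have hget : ∀ j : Nat, j < N → ∀ h1 h2, (pvCurrAt dests N t)[j]'h1 = pvApproach (pvD dests ((j : Nat) : Int)) ((j : Nat) : Int) t ∧ dests[j]'h2 = pvD dests ((j : Nat) : Int) := by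
    intro j hj h1 h2
    constructor
    · unfold pvCurrAt
      simp only [List.getElem_map, PySem.List.getElem_pyRange_one, zero_add]
    · unfold pvD
      rw [PySem.List.pyGetD_natCast]
      simp [List.getD, hj, hlen]
  constructor
  · intro h k hk
    rw [PySem.List.mem_pyRange_one] at hk
    have hj : k.toNat < N := by omega
    have h1 : k.toNat < (pvCurrAt dests N t).length := by omega
    have h2 : k.toNat < dests.length := by omega
    have := List.getElem_of_eq h h1
    obtain ⟨e1, e2⟩ := hget k.toNat hj h1 h2
    rw [e1, e2] at this
    rw [show ((k.toNat : Nat) : Int) = k by omega] at this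
    rw [← pvApproach_eq_iff]
    exact this
  · intro hf
    apply List.ext_getElem (by omega)
    intro j h1 h2
    obtain ⟨e1, e2⟩ := hget j (by omega) h1 h2
    rw [e1, e2, pvApproach_eq_iff]
    exact hf _ (PySem.List.mem_pyRange_one.mpr ⟨by positivity, by omega⟩)

theorem pvLoopA_spec (dests : List Int) (N : Nat) (hlen : dests.length = N) (r0 : Nat)
    (hub : ∀ k ∈ PySem.List.pyRange 0 (N : Int) 1, |pvD dests k - k| ≤ (r0 : Int))
    (hex : ∃ k ∈ PySem.List.pyRange 0 (N : Int) 1, |pvD dests k - k| = (r0 : Int)) :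
    ∀ (fuel t : Nat) (fut out : List _), fut.length = N → r0 ≤ t + fuel →
      pvLoopA (N : Int) dests fuel (pvCurrAt dests N t) fut out
        = out ++ (List.range (r0 - t)).map
            (fun i => String.ofList (pvRowAt dests N (t + i))) := by
  intro fuel
  induction fuel with
  | zero =>
    intro t fut out hf hr
    simp only [pvLoopA]
    rw [show r0 - t = 0 by omega]
    simp
  | succ f ih =>
    intro t fut out hf hr
    by_cases hstop : pvCurrAt dests N t = dests
    · have hle : r0 ≤ t := by
        obtain ⟨k, hk, he⟩ := hex
        have := (pvStopIff dests N hlen t).mp hstop k hk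
        omega
      simp only [pvLoopA, if_pos hstop]
      rw [show r0 - t = 0 by omega]
      simp
    · have hlt : t < r0 := by
        by_contra hc
        apply hstop
        rw [pvStopIff dests N hlen t]
        intro k hk
        have := hub k hk
        omega
      simp only [pvLoopA, if_neg hstop]
      rw [pvLoopBody_eq]
      dsimp only
      rw [pvRowFold dests N t, pvFutFold dests N t fut hf]
      rw [ih (t + 1) (pvCurrAt dests N t)
            (out ++ [String.ofList (pvRowAt dests N t)])
            (by unfold pvCurrAt; simp [PySem.List.length_pyRange_one]) (by omega)]
      rw [show r0 - t = (r0 - (t + 1)) + 1 by omega, List.range_succ_eq_map]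
      simp only [List.map_cons, List.map_map, Nat.add_zero, List.append_assoc,
                 List.cons_append, List.nil_append]
      congr 2
      apply List.map_congr_left
      intro i _
      simp only [Function.comp_apply]
      congr 2
      omega

-- B side: effect of one inner diagonal loop on the grid, row by row
theorem pvInnerFold (p : Int → Int) (c : Char) (m : Nat) :
    ∀ (g : List (List Char)), m ≤ g.length →
    (PySem.List.pyRange 0 (m : Int) 1).foldl
        (fun g2 t => PySem.List.pySetD g2 t
          (PySem.List.pySetD (PySem.List.pyGetD g2 t []) (p t) c)) g
      = g.mapIdx (fun t row => if t < m then PySem.List.pySetD row (p (t : Int)) c else row) := by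
  induction m with
  | zero =>
    intro g _
    rw [PySem.List.pyRange_one_eq_nil (by omega)]
    apply List.ext_getElem (by simp)
    intro j h1 h2
    simp [List.getElem_mapIdx]
  | succ m ih =>
    intro g h
    rw [show ((m + 1 : Nat) : Int) = (m : Int) + 1 by push_cast; ring,
        PySem.List.pyRange_one_succ_right (by positivity), List.foldl_append,
        ih g (by omega)]
    simp only [List.foldl_cons, List.foldl_nil]
    have hm : m < (g.mapIdx fun t row => if t < m then PySem.List.pySetD row (p ↑t) c else row).length := by
      simp [List.length_mapIdx]; omega
    rw [show ((m : Int)) = ((m : Nat) : Int) from rfl, PySem.List.pyGetD_natCast,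
        PySem.List.pySetD_natCast, List.getD_eq_getElem _ _ hm, List.getElem_mapIdx,
        if_neg (lt_irrefl m)]
    apply List.ext_getElem (by simp)
    intro j h1 h2
    rw [List.getElem_set]
    simp only [List.getElem_mapIdx]
    rcases eq_or_ne m j with heq | hne
    · subst heq
      rw [if_pos rfl, if_pos (Nat.lt_succ_self m)]
    · rw [if_neg hne]
      split_ifs with hj hj2 <;> first | rfl | omega

theorem pvBStep_eq (dests : List Int) (k : Int) (g : List (List Char)) (r0 : Nat)
    (hg : g.length = r0) (hb : |pvD dests k - k| ≤ (r0 : Int)) :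
    pvBStep dests g k = g.mapIdx (fun t row => pvWriteK t (pvD dests k) k row) := by
  unfold pvBStep
  dsimp only
  rw [show PySem.List.pyGetD dests k 0 = pvD dests k from rfl]
  rcases lt_trichotomy (pvD dests k) k with hkd | hkd | hkd
  · rw [if_neg (by omega), if_pos hkd]
    have habs : |pvD dests k - k| = k - pvD dests k := by
      rw [abs_of_neg (show pvD dests k - k < 0 by omega)]; ring
    set m : Nat := (k - pvD dests k).toNat with hm
    rw [show k - pvD dests k = ((m : Nat) : Int) by omega,
        pvInnerFold (fun t => k - t) '/' m g (by omega)]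
    congr 1
    funext t row
    unfold pvWriteK
    by_cases ht : t < m
    · rw [if_pos ht, if_pos (by rw [habs]; omega)]
      congr 1
      · unfold pvApproach
        rw [if_neg (by omega)]
        omega
      · rw [if_neg (by omega)]
    · rw [if_neg ht, if_neg (by rw [habs]; omega)]
  · rw [if_neg (by omega), if_neg (by omega)]
    apply List.ext_getElem (by simp)
    intro j h1 h2
    simp only [List.getElem_mapIdx]
    unfold pvWriteK
    rw [if_neg (by
      rw [show |pvD dests k - k| = 0 by rw [show pvD dests k - k = 0 by omega]; simp]
      omega)]
  · rw [if_pos hkd]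
    have habs : |pvD dests k - k| = pvD dests k - k := abs_of_pos (by omega)
    set m : Nat := (pvD dests k - k).toNat with hm
    rw [show pvD dests k - k = ((m : Nat) : Int) by omega,
        pvInnerFold (fun t => k + t) '\\' m g (by omega)]
    congr 1
    funext t row
    unfold pvWriteK
    by_cases ht : t < m
    · rw [if_pos ht, if_pos (by rw [habs]; omega)]
      congr 1
      · unfold pvApproach
        rw [if_pos (by omega)]
        omega
      · rw [if_pos (by omega)]
    · rw [if_neg ht, if_neg (by rw [habs]; omega)]

theorem pvBFold (dests : List Int) (r0 : Nat) :
    ∀ (ks : List Int) (g : List (List Char)), g.length = r0 →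
      (∀ k ∈ ks, |pvD dests k - k| ≤ (r0 : Int)) →
      ks.foldl (pvBStep dests) g
        = g.mapIdx (fun t row =>
            ks.foldl (fun row k => pvWriteK t (pvD dests k) k row) row) := by
  intro ks
  induction ks with
  | nil =>
    intro g _ _
    apply List.ext_getElem (by simp)
    intro j h1 h2
    simp [List.getElem_mapIdx]
  | cons k ks ih =>
    intro g hg hb
    rw [List.foldl_cons,
        pvBStep_eq dests k g r0 hg (hb k (by simp)),
        ih _ (by simp [List.length_mapIdx, hg]) (fun k' hk' => hb k' (List.mem_cons_of_mem _ hk')),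
        List.mapIdx_mapIdx]
    rfl

theorem pvDests_bounds (dat : List Int) :
    ∀ d ∈ pvDests dat, 0 ≤ d ∧ d < (dat.length : Int) := by
  intro d hd
  unfold pvDests at hd
  rw [PySem.List.foldl_append_eq_flatMap] at hd
  simp only [List.nil_append, List.mem_flatMap] at hd
  obtain ⟨kq, hkq, hd⟩ := hd
  rw [PySem.List.mem_enumerate_iff] at hkq
  obtain ⟨j, hj, rfl⟩ := hkq
  simp only [List.mem_map] at hd
  obtain ⟨_, _, rfl⟩ := hd
  refine ⟨by simp, ?_⟩
  simp
  omega

theorem solve_spec : Claim_equal_solve := by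
  intro dat _ hpre
  unfold Spec_solve solve solve_alt
  simp only []
  split_ifs with h1 h2 h3 h4 h5 <;> try rfl
  -- main branch: all guards pass
  have hne : dat ≠ [] := hpre.1
  have hN : 0 < dat.length := List.length_pos_iff.mpr hne
  have hlen : (pvDests dat).length = dat.length := by
    rw [PySem.List.len_eq, PySem.List.len_eq] at h3; exact_mod_cast h3
  simp only [PySem.List.len_eq]
  set dests := pvDests dat with hdests
  set lst := (PySem.List.pyRange 0 (dat.length : Int) 1).map
      (fun k => |PySem.List.pyGetD dests k 0 - k|) with hlst
  obtain ⟨R, hmax⟩ : ∃ m, PySem.List.max? lst (fun x => x) = some m := by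
    rcases hm : PySem.List.max? lst (fun x => x) with _ | m
    · rw [PySem.List.max?_eq_none_iff] at hm
      exfalso
      have : lst.length = dat.length := by
        rw [hlst]; simp [PySem.List.length_pyRange_one]
      rw [hm] at this
      simp at this
      omega
    · exact ⟨m, rfl⟩
  rw [hmax]
  simp only [Option.getD_some]
  have hub : ∀ k ∈ PySem.List.pyRange 0 (dat.length : Int) 1,
      |PySem.List.pyGetD dests k 0 - k| ≤ R := by
    intro k hk
    exact PySem.List.max?_isMax hmax _ (List.mem_map_of_mem hk)
  obtain ⟨j, hj, hjv⟩ := List.mem_map.mp (PySem.List.max?_mem hmax)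
  have hR0 : 0 ≤ R := hjv ▸ abs_nonneg _
  have hjr : 0 ≤ j ∧ j < (dat.length : Int) := PySem.List.mem_pyRange_one.mp hj
  have hdj : PySem.List.pyGetD dests j 0 ∈ dests := by
    apply PySem.List.pyGetD_mem
    refine ⟨by rw [hlen]; omega, by rw [hlen]; omega⟩
  have hdjb := pvDests_bounds dat _ hdj
  have hRN : R ≤ (dat.length : Int) := by
    rw [← hjv]
    exact abs_le.mpr ⟨by omega, by omega⟩
  set r0 := R.toNat with hr0
  have hr0R : (r0 : Int) = R := Int.toNat_of_nonneg hR0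
  -- A side: the simulation loop produces the rows 0 .. r0-1
  have hA : pvLoopA (dat.length : Int) dests (dat.length + 1)
      (PySem.List.pyRange 0 (dat.length : Int) 1) (PySem.List.pyRange 0 (dat.length : Int) 1) []
      = (List.range r0).map (fun i => String.ofList (pvRowAt dests dat.length i)) := by
    conv_lhs => rw [← pvCurrAt_zero dests dat.length]
    rw [pvLoopA_spec dests dat.length hlen r0
          (by intro k hk; rw [hr0R]; exact hub k hk)
          ⟨j, hj, by rw [hr0R]; exact hjv⟩
          (dat.length + 1) 0 _ []
          (by unfold pvCurrAt; simp [PySem.List.length_pyRange_one]) (by omega)]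
    simp
  rw [hA]
  -- B side: the grid equals the same list of rows
  have hgrid0 : (List.map (fun _ => List.map (fun _ => '.') (PySem.List.pyRange 0 (dat.length : Int) 1))
      (PySem.List.pyRange 0 R 1)).length = r0 := by
    simp [PySem.List.length_pyRange_one]
    omega
  have hB : List.foldl (pvBStep dests)
      (List.map (fun _ => List.map (fun _ => '.') (PySem.List.pyRange 0 (dat.length : Int) 1))
        (PySem.List.pyRange 0 R 1))
      (PySem.List.pyRange 0 (dat.length : Int) 1)
      = (List.range r0).map (fun t => pvRowAt dests dat.length t) := by
    rw [pvBFold dests r0 _ _ hgrid0 (by intro k hk; rw [hr0R]; exact hub k hk)]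
    apply List.ext_getElem (by simp [PySem.List.length_pyRange_one]; omega)
    intro t h1' h2'
    simp only [List.getElem_mapIdx, List.getElem_map, List.getElem_range]
    rfl
  rw [hB, PySem.List.foldl_append_singleton_eq_map, List.map_map]
  -- header: len(out) after the final append is r0 + 1 = R + 1
  simp only [List.length_append, List.length_map, List.length_range, List.length_cons,
             List.length_nil]
  rw [show ((r0 + 1 : Nat) : Int) = R + 1 by omega]
  simp only [Function.comp_def, List.cons_append, List.nil_append]
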